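-- pv_equiv track=rewrite | github.com/Ben-Edwards44/Advent-Of-Code | 2025/day11.py | dfs
-- ===== SOURCE A (Python) =====
-- def dfs(current, target, connections, cache):
--     if current == target:
--         return 1
--     elif current in cache:
--         return cache[current]
--
--     total = 0
--     for i in connections[current]:
--         total += dfs(i, target, connections, cache)
--
--     cache[current] = total
--
--     return total
-- ===== SOURCE B (Python) =====
-- # Iterative re-implementation: explicit stack of (node, resolved) frames instead of recursion.
-- # Mutates `cache` in place exactly like the original (same keys, same values); return value is what's compared.
-- def dfs(current, target, connections, cache):
--     if current == target:
--         return 1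
--     if current in cache:
--         return cache[current]
--     stack = [(current, False)]
--     while stack:
--         node, resolved = stack.pop()
--         if resolved:
--             total = 0
--             for c in connections[node]:
--                 total += 1 if c == target else cache[c]
--             cache[node] = total
--         else:
--             if node == target or node in cache:
--                 continue
--             stack.append((node, True))
--             for c in reversed(connections[node]):
--                 stack.append((c, False))
--     return cache[current]
-- ===== Notes on version B (the rewrite author's own statement) =====
-- stated objective: alternative
-- what changed: The recursive memoized DFS is replaced by an explicit stack machine of (node, resolved) frames: a post-order traversal that caches each node's child-sum on its second visit and finally reads cache[current], instead of Python call-stack recursion.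
import Mathlib
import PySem

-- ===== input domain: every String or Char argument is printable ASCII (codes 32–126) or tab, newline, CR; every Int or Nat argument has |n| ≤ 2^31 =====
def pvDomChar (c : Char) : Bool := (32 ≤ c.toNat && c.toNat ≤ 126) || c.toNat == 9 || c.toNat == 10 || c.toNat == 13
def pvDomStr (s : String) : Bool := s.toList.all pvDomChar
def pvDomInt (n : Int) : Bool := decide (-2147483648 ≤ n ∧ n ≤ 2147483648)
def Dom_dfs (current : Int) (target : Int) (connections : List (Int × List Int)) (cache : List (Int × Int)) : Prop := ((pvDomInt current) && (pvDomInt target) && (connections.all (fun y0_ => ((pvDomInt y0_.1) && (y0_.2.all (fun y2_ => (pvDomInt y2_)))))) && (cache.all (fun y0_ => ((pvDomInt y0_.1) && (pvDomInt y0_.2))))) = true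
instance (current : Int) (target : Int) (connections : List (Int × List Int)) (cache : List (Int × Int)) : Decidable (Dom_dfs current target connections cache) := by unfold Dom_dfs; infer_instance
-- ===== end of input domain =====

-- B replaces the recursive memoized DFS by an explicit (node, resolved)-frame stack machine (post-order
-- traversal); both Pythons mutate `cache` identically — the equivalence proved here is about the RETURN value.

-- ===== PORT A =====
-- goA f n … c is the Python call dfs(n, target, connections, cache) with the mutated dict threaded through:
-- some (returned value, cache afterwards); none where Python raises KeyError, or the fuel (a recursion
-- depth bound, sufficient on Pre_) runs out.
mutual
def goA : Nat → Int → Int → PySem.Dict Int (List Int) → PySem.Dict Int Int → Option (Int × PySem.Dict Int Int)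
  | 0, _, _, _, _ => none
  | fuel + 1, current, target, conns, cache =>
    if current = target then some (1, cache)
    else match cache.get? current with
      | some v => some (v, cache)
      | none =>
        match conns.get? current with
        | none => none
        | some children =>
          match goAList fuel children target conns cache 0 with
          | none => none
          | some (total, c') => some (total, c'.insert current total)
  termination_by fuel _ _ _ _ => (fuel, 0)
def goAList : Nat → List Int → Int → PySem.Dict Int (List Int) → PySem.Dict Int Int → Int → Option (Int × PySem.Dict Int Int)
  | _, [], _, _, cache, total => some (total, cache)
  | fuel, i :: rest, target, conns, cache, total =>
    match goA fuel i target conns cache with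
    | none => none
    | some (v, c') => goAList fuel rest target conns c' (total + v)
  termination_by fuel ch _ _ _ _ => (fuel, ch.length + 1)
end

def dfs (current : Int) (target : Int) (connections : List (Int × List Int)) (cache : List (Int × Int)) : Int :=
  match goA (connections.length + 1) current target (PySem.Dict.mk connections) (PySem.Dict.mk cache) with
  | some (v, _) => v
  | none => 0

-- ===== PORT B =====
-- fuel bound for the while-loop (a totality guard only; large enough on Pre_)
def stepBound (E : Nat) : Nat → Nat
  | 0 => 1
  | f + 1 => 2 + E * stepBound E f

-- the `total += 1 if c == target else cache[c]` loop of the resolved branch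
def sumB (children : List Int) (target : Int) (cache : PySem.Dict Int Int) (total : Int) : Option Int :=
  match children with
  | [] => some total
  | c :: rest =>
    if c = target then sumB rest target cache (total + 1)
    else match cache.get? c with
      | none => none                      -- KeyError: cache[c]
      | some v => sumB rest target cache (total + v)

-- the `while stack:` loop; the Lean stack head is the Python stack top, so pushing the reversed
-- children list then popping yields `children.map … ++ (node, true) :: rest`
def loopB (fuel : Nat) (stack : List (Int × Bool)) (target : Int) (conns : PySem.Dict Int (List Int))
    (cache : PySem.Dict Int Int) : Option (PySem.Dict Int Int) :=
  match fuel with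
  | 0 => none
  | fuel + 1 =>
    match stack with
    | [] => some cache
    | (node, resolved) :: stack =>
      if resolved then
        match conns.get? node with
        | none => none                    -- KeyError: connections[node]
        | some children =>
          match sumB children target cache 0 with
          | none => none
          | some total => loopB fuel stack target conns (cache.insert node total)
      else if node = target then loopB fuel stack target conns cache
      else match cache.get? node with
        | some _ => loopB fuel stack target conns cache
        | none =>
          match conns.get? node with
          | none => none                  -- KeyError: connections[node]
          | some children =>
            loopB fuel (children.map (fun c => (c, false)) ++ (node, true) :: stack) target conns cache



def dfs_alt (current : Int) (target : Int) (connections : List (Int × List Int)) (cache : List (Int × Int)) : Int :=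
  if current = target then 1
  else match (PySem.Dict.mk cache).get? current with
    | some v => v
    | none =>
      match loopB (stepBound ((connections.map (fun p => p.2.length)).sum) (connections.length + 1) + 1)
          [(current, false)] target (PySem.Dict.mk connections) (PySem.Dict.mk cache) with
      | none => 0
      | some c' => ((c'.get? current).getD 0)

-- ===== PRECONDITION & SPEC =====
-- goodNode: every neighbour of n is the target, already cached, or already known-terminating
def goodNode (target : Int) (conns : PySem.Dict Int (List Int)) (cache0 : PySem.Dict Int Int)
    (S : List Int) (n : Int) : Bool :=
  match conns.get? n with
  | none => false
  | some ch => ch.all (fun v => v == target || (cache0.get? v).isSome || S.contains v)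

def termIter (target : Int) (conns : PySem.Dict Int (List Int)) (cache0 : PySem.Dict Int Int)
    (connKeys : List Int) : Nat → List Int
  | 0 => []
  | k + 1 => connKeys.filter (goodNode target conns cache0 (termIter target conns cache0 connKeys k))

-- Pre_: current is the target, already cached, or lies in the well-founded covered region of the
-- dependency graph — exactly the inputs where the Python recursion terminates without a KeyError
-- (elsewhere A raises KeyError / RecursionError, or does not terminate, and B raises or loops too).
def Pre_dfs (current : Int) (target : Int) (connections : List (Int × List Int)) (cache : List (Int × Int)) : Prop :=
  current = target ∨ ((PySem.Dict.mk cache).get? current).isSome ∨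
    current ∈ termIter target (PySem.Dict.mk connections) (PySem.Dict.mk cache)
      (connections.map Prod.fst) connections.length

instance (current : Int) (target : Int) (connections : List (Int × List Int)) (cache : List (Int × Int)) : Decidable (Pre_dfs current target connections cache) := by unfold Pre_dfs; infer_instance

def pvWitness_dfs : Int × Int × (List (Int × List Int)) × (List (Int × Int)) := (0, 2, [(0, [1, 2]), (1, [2, 2])], [(5, 7)])

def Spec_dfs (current : Int) (target : Int) (connections : List (Int × List Int)) (cache : List (Int × Int)) (out : Int) : Prop := out = dfs_alt current target connections cache
instance (current : Int) (target : Int) (connections : List (Int × List Int)) (cache : List (Int × Int)) (out : Int) : Decidable (Spec_dfs current target connections cache out) := by unfold Spec_dfs; infer_instance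

-- ===== CLAIM (what is proved, stated in full; the proofs are below) =====
def Claim_equal_dfs : Prop := ∀ (current : Int) (target : Int) (connections : List (Int × List Int)) (cache : List (Int × Int)), Dom_dfs current target connections cache → Pre_dfs current target connections cache → Spec_dfs current target connections cache (dfs current target connections cache)

-- ===== LEMMAS AND PROOFS =====

-- cache entries are never overwritten or removed by a dfs call
def Preserves (c c' : PySem.Dict Int Int) : Prop := ∀ k w, c.get? k = some w → c'.get? k = some w

theorem preserves_goA : ∀ (fuel : Nat) (t : Int) (conns : PySem.Dict Int (List Int)),
    (∀ n c v c', goA fuel n t conns c = some (v, c') → Preserves c c') ∧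
    (∀ ch c tot v c', goAList fuel ch t conns c tot = some (v, c') → Preserves c c') := by
  intro fuel
  induction fuel with
  | zero =>
    intro t conns
    constructor
    · intro n c v c' h; simp [goA] at h
    · intro ch c tot v c' h
      cases ch with
      | nil => simp [goAList] at h; obtain ⟨_, h2⟩ := h; subst h2; intro k w hw; exact hw
      | cons i rest => simp [goAList, goA] at h
  | succ fuel ih =>
    intro t conns
    have hA : ∀ n c v c', goA (fuel+1) n t conns c = some (v, c') → Preserves c c' := by
      intro n c v c' h
      by_cases hnt : n = t
      · simp [goA, hnt] at h; obtain ⟨_, h2⟩ := h; subst h2; intro k w hw; exact hw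
      · simp [goA, hnt] at h
        cases hc : c.get? n with
        | some w => simp [hc] at h; obtain ⟨_, h2⟩ := h; subst h2; intro k w hw; exact hw
        | none =>
          simp [hc] at h
          cases hcn : conns.get? n with
          | none => simp [hcn] at h
          | some children =>
            simp [hcn] at h
            cases hl : goAList fuel children t conns c 0 with
            | none => simp [hl] at h
            | some p =>
              obtain ⟨tot, c''⟩ := p
              simp [hl] at h
              obtain ⟨h1, h2⟩ := h
              subst h2
              intro k w hw
              have hk : k ≠ n := by intro he; subst he; rw [hc] at hw; cases hw
              rw [PySem.Dict.get?_insert, if_neg hk]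
              exact (ih t conns).2 children c 0 tot c'' hl k w hw
    constructor
    · exact hA
    · intro ch
      induction ch with
      | nil => intro c tot v c' h; simp [goAList] at h; obtain ⟨_, h2⟩ := h; subst h2; intro k w hw; exact hw
      | cons i rest ihr =>
        intro c tot v c' h
        simp [goAList] at h
        cases hg : goA (fuel+1) i t conns c with
        | none => simp [hg] at h
        | some p =>
          obtain ⟨w1, c1⟩ := p
          simp [hg] at h
          intro k w hw
          exact ihr c1 (tot + w1) v c' h k w (hA i c w1 c1 hg k w hw)

theorem valA (fuel : Nat) (n t : Int) (conns : PySem.Dict Int (List Int)) (c : PySem.Dict Int Int)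
    (v : Int) (c' : PySem.Dict Int Int) (h : goA fuel n t conns c = some (v, c')) :
    (n = t → v = 1 ∧ c' = c) ∧ (n ≠ t → c'.get? n = some v) := by
  cases fuel with
  | zero => simp [goA] at h
  | succ fuel =>
    by_cases hnt : n = t
    · simp [goA, hnt] at h
      exact ⟨fun _ => ⟨h.1.symm, h.2.symm⟩, fun hn => absurd hnt hn⟩
    · simp [goA, hnt] at h
      refine ⟨fun he => absurd he hnt, fun _ => ?_⟩
      cases hc : c.get? n with
      | some w => simp [hc] at h; rw [← h.2, hc, h.1]
      | none =>
        simp [hc] at h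
        cases hcn : conns.get? n with
        | none => simp [hcn] at h
        | some children =>
          simp [hcn] at h
          cases hl : goAList fuel children t conns c 0 with
          | none => simp [hl] at h
          | some p =>
            obtain ⟨tot, c''⟩ := p
            simp [hl] at h
            rw [← h.2, ← h.1, PySem.Dict.get?_insert_self]

theorem sim_goA (t : Int) (conns : PySem.Dict Int (List Int)) (E : Nat)
    (hE : ∀ n ch, conns.get? n = some ch → ch.length ≤ E) :
    ∀ (fuel : Nat),
    (∀ n c v c', goA fuel n t conns c = some (v, c') →
      ∃ k ≤ stepBound E fuel, ∀ m stack,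
        loopB (k + m) ((n, false) :: stack) t conns c = loopB m stack t conns c') := by
  intro fuel
  induction fuel with
  | zero => intro n c v c' h; simp [goA] at h
  | succ fuel ih =>
    have hList : ∀ ch c tot v c', goAList fuel ch t conns c tot = some (v, c') →
        sumB ch t c' tot = some v ∧
        ∃ k ≤ ch.length * stepBound E fuel, ∀ m stack,
          loopB (k + m) (ch.map (fun x => (x, false)) ++ stack) t conns c = loopB m stack t conns c' := by
      intro ch
      induction ch with
      | nil =>
        intro c tot v c' h
        simp [goAList] at h
        obtain ⟨h1, h2⟩ := h; subst h1; subst h2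
        exact ⟨rfl, 0, by simp, fun m stack => by simp⟩
      | cons i rest ihr =>
        intro c tot v c' h
        simp [goAList] at h
        cases hg : goA fuel i t conns c with
        | none => simp [hg] at h
        | some p =>
          obtain ⟨v1, c1⟩ := p
          simp [hg] at h
          obtain ⟨hsum, k2, hk2, hstep2⟩ := ihr c1 (tot + v1) v c' h
          obtain ⟨k1, hk1, hstep1⟩ := ih i c v1 c1 hg
          have hval := valA fuel i t conns c v1 c1 hg
          have hpres : Preserves c1 c' := (preserves_goA fuel t conns).2 rest c1 (tot + v1) v c' h
          constructor
          · by_cases hit : i = t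
            · have := (hval.1 hit).1; subst this
              simp [sumB, hit, hsum]
            · have hgi : c'.get? i = some v1 := hpres i v1 (hval.2 hit)
              simp [sumB, hit, hgi, hsum]
          · refine ⟨k1 + k2, ?_, ?_⟩
            · have : (rest.length + 1) * stepBound E fuel = rest.length * stepBound E fuel + stepBound E fuel := by ring
              simp only [List.length_cons, this]
              omega
            · intro m stack
              have e1 : k1 + k2 + m = k1 + (k2 + m) := by omega
              simp only [List.map_cons, List.cons_append, e1]
              rw [hstep1 (k2 + m) (rest.map (fun x => (x, false)) ++ stack), hstep2 m stack]
    intro n c v c' h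
    by_cases hnt : n = t
    · simp [goA, hnt] at h
      obtain ⟨h1, h2⟩ := h; subst h1; subst h2
      refine ⟨1, by simp only [stepBound]; omega, fun m stack => ?_⟩
      rw [Nat.add_comm 1 m]
      simp [loopB, hnt]
    · simp [goA, hnt] at h
      cases hc : c.get? n with
      | some w =>
        simp [hc] at h
        obtain ⟨h1, h2⟩ := h; subst h1; subst h2
        refine ⟨1, by simp only [stepBound]; omega, fun m stack => ?_⟩
        rw [Nat.add_comm 1 m]
        simp [loopB, hnt, hc]
      | none =>
        simp [hc] at h
        cases hcn : conns.get? n with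
        | none => simp [hcn] at h
        | some children =>
          simp [hcn] at h
          cases hl : goAList fuel children t conns c 0 with
          | none => simp [hl] at h
          | some p =>
            obtain ⟨tot, c''⟩ := p
            simp [hl] at h
            obtain ⟨h1, h2⟩ := h; subst h1; subst h2
            obtain ⟨hsum, klist, hkl, hstep⟩ := hList children c 0 tot c'' hl
            refine ⟨klist + 2, ?_, ?_⟩
            · have hlen := hE n children hcn
              have : children.length * stepBound E fuel ≤ E * stepBound E fuel :=
                Nat.mul_le_mul_right _ hlen
              simp [stepBound]; omega
            · intro m stack
              have e1 : klist + 2 + m = (klist + (1 + m)) + 1 := by omega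
              rw [e1]
              simp only [loopB, hnt, hc, hcn]
              rw [hstep (1 + m) ((n, true) :: stack)]
              rw [Nat.add_comm 1 m]
              simp [loopB, hcn, hsum]

theorem succ_goA (t : Int) (conns : PySem.Dict Int (List Int)) (cache0 : PySem.Dict Int Int)
    (connKeys : List Int) :
    ∀ (k : Nat) (fuel : Nat) (n : Int) (c : PySem.Dict Int Int), 1 ≤ fuel → Preserves cache0 c →
      (n = t ∨ (c.get? n).isSome ∨ (n ∈ termIter t conns cache0 connKeys k ∧ k + 1 ≤ fuel)) →
      (goA fuel n t conns c).isSome := by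
  intro k
  induction k with
  | zero =>
    intro fuel n c hf hp hdisj
    obtain ⟨f, rfl⟩ : ∃ f, fuel = f + 1 := ⟨fuel - 1, by omega⟩
    rcases hdisj with hnt | hc | ⟨hmem, _⟩
    · simp [goA, hnt]
    · obtain ⟨w, hw⟩ := Option.isSome_iff_exists.mp hc
      by_cases hnt : n = t <;> simp [goA, hnt, hw]
    · simp [termIter] at hmem
  | succ k ihk =>
    intro fuel n c hf hp hdisj
    obtain ⟨f, rfl⟩ : ∃ f, fuel = f + 1 := ⟨fuel - 1, by omega⟩
    by_cases hnt : n = t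
    · simp [goA, hnt]
    · cases hc : c.get? n with
      | some w => simp [goA, hnt, hc]
      | none =>
        rcases hdisj with h | h | ⟨hmem, hfk⟩
        · exact absurd h hnt
        · rw [hc] at h; simp at h
        · have hgood : goodNode t conns cache0 (termIter t conns cache0 connKeys k) n = true := by
            simp [termIter, List.mem_filter] at hmem; exact hmem.2
          unfold goodNode at hgood
          cases hcn : conns.get? n with
          | none => rw [hcn] at hgood; simp at hgood
          | some ch =>
            rw [hcn] at hgood
            simp only [List.all_eq_true] at hgood
            have hfl : k + 1 ≤ f := by omega
            have hSL : ∀ (l : List Int), (∀ v ∈ l, (v == t || (cache0.get? v).isSome ||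
                (termIter t conns cache0 connKeys k).contains v) = true) →
                ∀ c1 tot, Preserves cache0 c1 → (goAList f l t conns c1 tot).isSome := by
              intro l
              induction l with
              | nil => intro _ c1 tot _; simp [goAList]
              | cons v rest ihl =>
                intro hall c1 tot hp1
                have hv := hall v (List.mem_cons_self)
                simp only [Bool.or_eq_true, beq_iff_eq, List.contains_eq_mem, decide_eq_true_eq] at hv
                have hgv : (goA f v t conns c1).isSome := by
                  apply ihk f v c1 (by omega) hp1
                  rcases hv with (hv | hv) | hv
                  · exact Or.inl hv
                  · refine Or.inr (Or.inl ?_)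
                    obtain ⟨w, hw⟩ := Option.isSome_iff_exists.mp hv
                    exact Option.isSome_iff_exists.mpr ⟨w, hp1 v w hw⟩
                  · exact Or.inr (Or.inr ⟨hv, by omega⟩)
                obtain ⟨⟨v1, c2⟩, hg⟩ := Option.isSome_iff_exists.mp hgv
                have hp2 : Preserves cache0 c2 := fun kk w hw =>
                  (preserves_goA f t conns).1 v c1 v1 c2 hg kk w (hp1 kk w hw)
                have := ihl (fun x hx => hall x (List.mem_cons_of_mem _ hx)) c2 (tot + v1) hp2
                simpa [goAList, hg] using this
            have := hSL ch hgood c 0 hp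
            obtain ⟨⟨tot, c''⟩, hl⟩ := Option.isSome_iff_exists.mp this
            simp [goA, hnt, hc, hcn, hl]


theorem get?_mk_mem_pair : ∀ (l : List (Int × List Int)) (n : Int) (ch : List Int),
    (PySem.Dict.mk l).get? n = some ch → (n, ch) ∈ l := by
  intro l
  induction l with
  | nil => intro n ch h; simp [PySem.Dict.get?] at h
  | cons p rest ihl =>
    intro n ch h
    obtain ⟨k, v⟩ := p
    rw [PySem.Dict.get?_mk_cons] at h
    by_cases hk : k = n
    · simp [hk] at h; subst h; subst hk; exact List.mem_cons_self
    · simp [hk] at h; exact List.mem_cons_of_mem _ (ihl n ch h)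

-- ===== VERDICT (by name: the statement is the Claim_ definition above) =====
theorem dfs_spec : Claim_equal_dfs := by
  intro current target connections cache _ hpre
  unfold Spec_dfs
  have hsucc : (goA (connections.length + 1) current target (PySem.Dict.mk connections)
      (PySem.Dict.mk cache)).isSome := by
    apply succ_goA target (PySem.Dict.mk connections) (PySem.Dict.mk cache)
      (connections.map Prod.fst) connections.length _ current _ (by omega) (fun k w hw => hw)
    rcases hpre with h | h | h
    · exact Or.inl h
    · exact Or.inr (Or.inl h)
    · exact Or.inr (Or.inr ⟨h, le_refl _⟩)
  obtain ⟨⟨v, c'⟩, hg⟩ := Option.isSome_iff_exists.mp hsucc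
  have hdfs : dfs current target connections cache = v := by simp [dfs, hg]
  rw [hdfs]
  have hval := valA _ _ _ _ _ _ _ hg
  by_cases hct : current = target
  · have h1 := (hval.1 hct).1
    simp [dfs_alt, hct, h1]
  · unfold dfs_alt
    rw [if_neg hct]
    cases hc : (PySem.Dict.mk cache).get? current with
    | some w =>
      have hv : v = w := by simp [goA, hct, hc] at hg; exact hg.1.symm
      simp [hv]
    | none =>
      have hE : ∀ n ch, (PySem.Dict.mk connections).get? n = some ch →
          ch.length ≤ (connections.map (fun p => p.2.length)).sum := by
        intro n ch h
        exact List.single_le_sum (fun x _ => Nat.zero_le x) _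
          (List.mem_map.mpr ⟨(n, ch), get?_mk_mem_pair connections n ch h, rfl⟩)
      obtain ⟨k, hk, hstep⟩ := sim_goA target (PySem.Dict.mk connections)
        ((connections.map (fun p => p.2.length)).sum) hE (connections.length + 1) current
        (PySem.Dict.mk cache) v c' hg
      have hm : k + (stepBound ((connections.map (fun p => p.2.length)).sum) (connections.length + 1) + 1 - k)
          = stepBound ((connections.map (fun p => p.2.length)).sum) (connections.length + 1) + 1 := by omega
      rw [← hm, hstep]
      obtain ⟨m, hmm⟩ : ∃ m, stepBound ((connections.map (fun p => p.2.length)).sum) (connections.length + 1) + 1 - k = m + 1 :=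
        ⟨stepBound ((connections.map (fun p => p.2.length)).sum) (connections.length + 1) + 1 - k - 1, by omega⟩
      rw [hmm]
      simp [loopB, hval.2 hct]
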